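-- pv_equiv track=rewrite | github.com/bjih1999/algorithm | re_and_again/이분탐색/programmers/level2/퍼즐 게임 챌린지/main.py | solution
-- ===== SOURCE A (Python) =====
-- def calculate_time(diffs, times, prev_times, level):
--     time = 0
--     for i, d in enumerate(diffs):
--         if d > level:
--             time += (d - level) * (prev_times[i] + times[i])
--         time += times[i]
--     return time
--
-- def solution(diffs, times, limit):
--
--     prev_times = [0] + times
--     left = 1
--     right = max(diffs)
--     while left <= right:
--         mid = (left + right) // 2
--         current_time = calculate_time(diffs, times, prev_times, mid)
--
--         if current_time > limit:
--             left = mid + 1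
--         else:
--             right = mid - 1
--
--     return left
-- ===== SOURCE B (Python) =====
-- def solution(diffs, times, limit):
--     n = len(diffs)
--     # weight of level-d puzzle i when failing: time of previous puzzle + its own time
--     w = [p + t for p, t in zip([0] + times, times)]
--     pairs = sorted(zip(diffs, w), key=lambda p: p[0])
--     ds = [d for d, _ in pairs]
--     base = sum(times[:n])
--     # suf[k] = (sum of weights of pairs[k:], sum of d*weight of pairs[k:])
--     suf = [(0, 0)]
--     for d, wt in reversed(pairs):
--         pw, pdw = suf[-1]
--         suf.append((pw + wt, pdw + d * wt))
--     suf.reverse()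
--
--     def cost(level):
--         # first index whose difficulty exceeds level, by binary search
--         lo, hi = 0, len(ds)
--         while lo < hi:
--             m = (lo + hi) // 2
--             if ds[m] <= level:
--                 lo = m + 1
--             else:
--                 hi = m
--         sw, sdw = suf[lo]
--         return base + sdw - level * sw
--
--     left, right = 1, max(diffs)
--     while left <= right:
--         mid = (left + right) // 2
--         if cost(mid) > limit:
--             left = mid + 1
--         else:
--             right = mid - 1
--     return left
-- ===== Notes on version B (the rewrite author's own statement) =====
-- stated objective: alternative
-- what changed: B presorts the (difficulty, weight) pairs and precomputes suffix weighted sums, so each binary-search probe is evaluated by an O(log n) inner binary search instead of A's O(n) rescan of all puzzles.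
import Mathlib
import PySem

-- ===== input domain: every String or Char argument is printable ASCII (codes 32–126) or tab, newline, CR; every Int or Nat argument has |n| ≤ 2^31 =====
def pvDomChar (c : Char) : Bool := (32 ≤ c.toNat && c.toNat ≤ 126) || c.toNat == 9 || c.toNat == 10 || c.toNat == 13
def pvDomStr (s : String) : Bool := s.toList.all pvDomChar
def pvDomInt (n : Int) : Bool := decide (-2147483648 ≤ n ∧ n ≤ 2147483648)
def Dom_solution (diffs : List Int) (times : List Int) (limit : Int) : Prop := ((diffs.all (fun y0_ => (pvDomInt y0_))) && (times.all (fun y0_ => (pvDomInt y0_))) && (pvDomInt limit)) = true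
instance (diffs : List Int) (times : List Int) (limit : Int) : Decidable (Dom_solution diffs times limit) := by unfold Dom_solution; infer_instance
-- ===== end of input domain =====

-- B presorts the (difficulty, weight) pairs and precomputes suffix weighted sums, so each
-- binary-search probe is answered by an inner binary search instead of rescanning all puzzles
-- (objective: alternative algorithm of similar measured cost).

-- ===== PORT A =====
-- helper calculate_time: 'for i, d in enumerate(diffs)' as a foldl over PySem.List.enumerate;
-- prev_times[i] / times[i] are in range under Pre_, ported with pyGetD.
def calculate_time (diffs times prev_times : List Int) (level : Int) : Int :=
  (PySem.List.enumerate diffs).foldl (fun time p =>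
    (if p.2 > level then
        time + (p.2 - level) * (PySem.List.pyGetD prev_times p.1 0 + PySem.List.pyGetD times p.1 0)
      else time)
    + PySem.List.pyGetD times p.1 0) 0

-- the 'while left <= right' loop; fuel (right-left+1).toNat is enough: the interval shrinks each step
def solLoopA (diffs times prev_times : List Int) (limit : Int) : Nat → Int → Int → Int
  | 0, left, _ => left
  | fuel + 1, left, right =>
    if left ≤ right then
      let mid := PySem.Int.floordiv (left + right) 2
      if calculate_time diffs times prev_times mid > limit then
        solLoopA diffs times prev_times limit fuel (mid + 1) right
      else
        solLoopA diffs times prev_times limit fuel left (mid - 1)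
    else left

def solution (diffs : List Int) (times : List Int) (limit : Int) : Int :=
  let prev_times := 0 :: times
  let left : Int := 1
  -- max(diffs): raises on [], excluded by Pre_; .getD 0 is never used there
  let right := (PySem.List.max? diffs (fun x => x)).getD 0
  solLoopA diffs times prev_times limit (right - left + 1).toNat left right

-- ===== PORT B =====
-- w = [p + t for p, t in zip([0] + times, times)]
def wlistB (times : List Int) : List Int := List.zipWith (fun p t => p + t) (0 :: times) times

-- the suffix-sum list: Python builds it by appending over reversed(pairs) and reversing;
-- here the accumulator is kept in final order (Python's suf[-1] is the accumulator's head)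
def sufB (pairs : List (Int × Int)) : List (Int × Int) :=
  pairs.reverse.foldl (fun acc p => (acc.headI.1 + p.2, acc.headI.2 + p.1 * p.2) :: acc) [(0, 0)]

-- inner 'while lo < hi' binary search for the first index with ds[m] > level; fuel ds.length suffices
def cutGo (ds : List Int) (level : Int) : Nat → Int → Int → Int
  | 0, lo, _ => lo
  | fuel + 1, lo, hi =>
    if lo < hi then
      let m := PySem.Int.floordiv (lo + hi) 2
      if PySem.List.pyGetD ds m 0 ≤ level then cutGo ds level fuel (m + 1) hi
      else cutGo ds level fuel lo m
    else lo

def costB (base : Int) (ds : List Int) (suf : List (Int × Int)) (level : Int) : Int :=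
  let lo := cutGo ds level ds.length 0 (ds.length : Int)
  let s := PySem.List.pyGetD suf lo (0, 0)
  base + s.2 - level * s.1

def solLoopB (base : Int) (ds : List Int) (suf : List (Int × Int)) (limit : Int) :
    Nat → Int → Int → Int
  | 0, left, _ => left
  | fuel + 1, left, right =>
    if left ≤ right then
      let mid := PySem.Int.floordiv (left + right) 2
      if costB base ds suf mid > limit then
        solLoopB base ds suf limit fuel (mid + 1) right
      else
        solLoopB base ds suf limit fuel left (mid - 1)
    else left

def solution_alt (diffs : List Int) (times : List Int) (limit : Int) : Int :=
  let w := wlistB times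
  let pairs := PySem.List.sorted (List.zip diffs w) (fun p => p.1) false
  let ds := pairs.map (fun p => p.1)
  let base := (PySem.List.slice times none (some (diffs.length : Int))).sum
  let suf := sufB pairs
  let left : Int := 1
  let right := (PySem.List.max? diffs (fun x => x)).getD 0
  solLoopB base ds suf limit (right - left + 1).toNat left right

-- ===== PRECONDITION & SPEC =====
-- Pre_ excludes exactly the inputs where A raises: max([]) is a ValueError on empty diffs,
-- and times[i] / prev_times[i] is an IndexError when diffs is longer than times.
def Pre_solution (diffs : List Int) (times : List Int) (limit : Int) : Prop :=
  diffs ≠ [] ∧ diffs.length ≤ times.length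
instance (diffs : List Int) (times : List Int) (limit : Int) : Decidable (Pre_solution diffs times limit) := by unfold Pre_solution; infer_instance

def pvWitness_solution : List Int × List Int × Int := ([3, 1], [2, 4], 10)

def Spec_solution (diffs : List Int) (times : List Int) (limit : Int) (out : Int) : Prop := out = solution_alt diffs times limit
instance (diffs : List Int) (times : List Int) (limit : Int) (out : Int) : Decidable (Spec_solution diffs times limit out) := by unfold Spec_solution; infer_instance

-- ===== CLAIM (what is proved, stated in full; the proofs are below) =====
def Claim_equal_solution : Prop := ∀ (diffs : List Int) (times : List Int) (limit : Int), Dom_solution diffs times limit → Pre_solution diffs times limit → Spec_solution diffs times limit (solution diffs times limit)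

-- ===== LEMMAS AND PROOFS =====

-- the weighted penalty sum both costs compute
def penG (level : Int) (l : List (Int × Int)) : Int :=
  (l.map (fun p => if level < p.1 then (p.1 - level) * p.2 else 0)).sum

def sumW (l : List (Int × Int)) : Int := (l.map (fun p => p.2)).sum
def sumDW (l : List (Int × Int)) : Int := (l.map (fun p => p.1 * p.2)).sum

theorem calc_fold (level : Int) :
    ∀ (ds : List Int) (times prev_times : List Int) (s : Nat) (acc : Int),
      s + ds.length ≤ times.length → s + ds.length ≤ prev_times.length →
      ((PySem.List.enumerate ds (s : Int)).foldl (fun time p =>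
          (if p.2 > level then
              time + (p.2 - level) * (PySem.List.pyGetD prev_times p.1 0 + PySem.List.pyGetD times p.1 0)
            else time)
          + PySem.List.pyGetD times p.1 0) acc)
        = acc + penG level (List.zip ds (List.zipWith (fun p t => p + t) (prev_times.drop s) (times.drop s)))
            + ((times.drop s).take ds.length).sum := by
  intro ds
  induction ds with
  | nil => intro times prev s acc _ _; simp [penG, PySem.List.enumerate]
  | cons d rest ih =>
    intro times prev s acc h1 h2
    simp only [List.length_cons] at h1 h2
    have hst : s < times.length := by omega
    have hsp : s < prev.length := by omega
    rw [PySem.List.enumerate_cons]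
    simp only [List.foldl_cons]
    have e1 : ((s : Int) + 1) = ((s + 1 : Nat) : Int) := by push_cast; ring
    rw [e1, ih times prev (s + 1) _ (by omega) (by omega)]
    rw [List.drop_eq_getElem_cons hst, List.drop_eq_getElem_cons hsp]
    simp only [List.zipWith_cons_cons, List.zip_cons_cons, penG, List.map_cons, List.sum_cons,
      List.length_cons, List.take_succ_cons, PySem.List.pyGetD_natCast, List.getD_eq_getElem?_getD,
      List.getElem?_eq_getElem hst, List.getElem?_eq_getElem hsp, Option.getD_some, gt_iff_lt]
    split_ifs <;> ring

theorem calc_eq_penG (diffs times : List Int) (level : Int)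
    (h : diffs.length ≤ times.length) :
    calculate_time diffs times (0 :: times) level
      = penG level (List.zip diffs (wlistB times)) + (times.take diffs.length).sum := by
  unfold calculate_time wlistB
  have h0 : ((0 : Nat) : Int) = 0 := by norm_num
  have := calc_fold level diffs times (0 :: times) 0 0 (by omega) (by simp; omega)
  rw [h0] at this
  simpa using this

theorem sufB_cons (p : Int × Int) (s : List (Int × Int)) :
    sufB (p :: s) = ((sufB s).headI.1 + p.2, (sufB s).headI.2 + p.1 * p.2) :: sufB s := by
  unfold sufB
  rw [List.reverse_cons, List.foldl_append]
  simp

theorem sufB_headI : ∀ s : List (Int × Int), (sufB s).headI = (sumW s, sumDW s) := by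
  intro s
  induction s with
  | nil => simp [sufB, sumW, sumDW]
  | cons p t ih =>
    rw [sufB_cons, ih]
    simp only [List.headI, sumW, sumDW, List.map_cons, List.sum_cons]
    rw [Prod.mk.injEq]
    constructor <;> ring

theorem sufB_getD : ∀ (s : List (Int × Int)) (k : Nat), k ≤ s.length →
    (sufB s).getD k (0, 0) = (sumW (s.drop k), sumDW (s.drop k)) := by
  intro s
  induction s with
  | nil =>
    intro k hk
    simp at hk; subst hk
    simp [sufB, sumW, sumDW]
  | cons p t ih =>
    intro k hk
    rw [sufB_cons]
    cases k with
    | zero =>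
      have hh := sufB_headI (p :: t)
      rw [sufB_cons] at hh
      simpa [List.getD] using hh
    | succ k =>
      simp only [List.getD_cons_succ, List.drop_succ_cons]
      exact ih k (by simpa using hk)

theorem cutGo_spec (ds : List Int) (level : Int) (hm : ds.Pairwise (· ≤ ·)) :
    ∀ (fuel : Nat) (lo hi : Int), 0 ≤ lo → lo ≤ hi → hi ≤ (ds.length : Int) →
      hi - lo ≤ (fuel : Int) →
      (∀ j : Nat, (j : Int) < lo → ∀ hj : j < ds.length, ds[j] ≤ level) →
      (∀ j : Nat, hi ≤ (j : Int) → ∀ hj : j < ds.length, level < ds[j]) →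
      ∃ k : Nat, cutGo ds level fuel lo hi = (k : Int) ∧ k ≤ ds.length ∧
        (∀ j : Nat, j < k → ∀ hj : j < ds.length, ds[j] ≤ level) ∧
        (∀ j : Nat, k ≤ j → ∀ hj : j < ds.length, level < ds[j]) := by
  have mono : ∀ (a b : Nat) (ha : a < ds.length) (hb : b < ds.length), a ≤ b → ds[a] ≤ ds[b] := by
    intro a b ha hb hab
    rcases Nat.lt_or_ge a b with hlt | hge
    · exact List.pairwise_iff_getElem.mp hm a b ha hb hlt
    · have : a = b := by omega
      subst this; exact le_refl _
  intro fuel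
  induction fuel with
  | zero =>
    intro lo hi h0 hlh hhl hf hlow hhigh
    have heq : lo = hi := by omega
    refine ⟨lo.toNat, by simp [cutGo, Int.toNat_of_nonneg h0], by omega, ?_, ?_⟩
    · intro j hj hjl; exact hlow j (by omega) hjl
    · intro j hj hjl; exact hhigh j (by omega) hjl
  | succ f ih =>
    intro lo hi h0 hlh hhl hf hlow hhigh
    by_cases hlt : lo < hi
    · have hmid := PySem.Int.floordiv_two_mid_bounds (lo := lo) (hi := hi) hlh
      set m := PySem.Int.floordiv (lo + hi) 2 with hmdef
      have hmhi : m < hi := by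
        rw [hmdef, PySem.Int.floordiv_lt_iff_lt_mul (by norm_num)]; omega
      have hm0 : 0 ≤ m := by omega
      have hmlen : m.toNat < ds.length := by omega
      have hmt : m = (m.toNat : Int) := by omega
      have hget : PySem.List.pyGetD ds m 0 = ds[m.toNat]'hmlen :=
        PySem.List.pyGetD_eq_getElem (xs := ds) (i := m) (d := 0) hm0 (by omega)
      simp only [cutGo, if_pos hlt, ← hmdef]
      by_cases hcmp : PySem.List.pyGetD ds m 0 ≤ level
      · rw [if_pos hcmp]
        refine ih (m + 1) hi (by omega) (by omega) hhl (by omega) ?_ hhigh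
        intro j hj hjl
        have hjm : j ≤ m.toNat := by omega
        exact le_trans (mono j m.toNat hjl hmlen hjm) (hget ▸ hcmp)
      · rw [if_neg hcmp]
        refine ih lo m h0 (by omega) (by omega) (by omega) hlow ?_
        intro j hj hjl
        have := hget ▸ (lt_of_not_ge hcmp)
        exact lt_of_lt_of_le this (mono m.toNat j hmlen hjl (by omega))
    · refine ⟨lo.toNat, by simp [cutGo, if_neg hlt, Int.toNat_of_nonneg h0], by omega, ?_, ?_⟩
      · intro j hj hjl; exact hlow j (by omega) hjl
      · intro j hj hjl
        have heq : lo = hi := by omega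
        exact hhigh j (by omega) hjl

theorem penG_all_gt (level : Int) : ∀ l : List (Int × Int), (∀ x ∈ l, level < x.1) →
    penG level l = sumDW l - level * sumW l := by
  intro l
  induction l with
  | nil => simp [penG, sumDW, sumW]
  | cons p t ih =>
    intro h
    simp only [penG, sumDW, sumW, List.map_cons, List.sum_cons] at *
    rw [if_pos (h p (by simp)), ih (fun x hx => h x (by simp [hx]))]
    ring

theorem penG_split : ∀ (s : List (Int × Int)) (level : Int) (k : Nat), k ≤ s.length →
    (∀ j : Nat, j < k → ∀ hj : j < s.length, s[j].1 ≤ level) →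
    (∀ j : Nat, k ≤ j → ∀ hj : j < s.length, level < s[j].1) →
    penG level s = sumDW (s.drop k) - level * sumW (s.drop k) := by
  intro s
  induction s with
  | nil => intro level k hk _ _; simp at hk; subst hk; simp [penG, sumDW, sumW]
  | cons p t ih =>
    intro level k hk h1 h2
    cases k with
    | zero =>
      rw [List.drop_zero]
      refine penG_all_gt level (p :: t) ?_
      intro x hx
      rcases List.mem_iff_getElem.mp hx with ⟨j, hj, rfl⟩
      exact h2 j (Nat.zero_le _) hj
    | succ k =>
      have hp : ¬ level < p.1 := not_lt.mpr (h1 0 (Nat.succ_pos _) (by simp))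
      simp only [penG, List.map_cons, List.sum_cons, if_neg hp, List.drop_succ_cons]
      rw [show (0 : Int) + _ = _ from by ring]
      exact ih level k (by simpa using hk)
        (fun j hj hjl => h1 (j + 1) (by omega) (by simpa using Nat.succ_lt_succ hjl))
        (fun j hj hjl => h2 (j + 1) (by omega) (by simpa using Nat.succ_lt_succ hjl))

theorem cost_eq (diffs times : List Int) (level : Int) (h : diffs.length ≤ times.length) :
    costB ((PySem.List.slice times none (some (diffs.length : Int))).sum)
      ((PySem.List.sorted (List.zip diffs (wlistB times)) (fun p => p.1) false).map (fun p => p.1))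
      (sufB (PySem.List.sorted (List.zip diffs (wlistB times)) (fun p => p.1) false)) level
      = calculate_time diffs times (0 :: times) level := by
  set s := PySem.List.sorted (List.zip diffs (wlistB times)) (fun p => p.1) false with hs
  have hperm : s.Perm (List.zip diffs (wlistB times)) := PySem.List.sorted_perm _ _ _
  have hpw : (s.map (fun p => p.1)).Pairwise (· ≤ ·) := by
    rw [List.pairwise_map]
    exact PySem.List.sorted_pairwise _ _
  set ds := s.map (fun p => p.1) with hds
  have hlen : ds.length = s.length := by simp [hds]
  obtain ⟨k, hk, hkle, hlo, hhi⟩ := cutGo_spec ds level hpw ds.length 0 (ds.length : Int)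
    (le_refl _) (by positivity) (le_refl _) (by omega)
    (fun j hj _ => absurd hj (by omega)) (fun j hj hjl => absurd hj (by omega))
  simp only [costB]
  rw [hk, PySem.List.pyGetD_natCast, sufB_getD s k (by omega)]
  have hdsj : ∀ (j : Nat) (hj : j < s.length), ds[j]'(by omega) = s[j].1 := by
    intro j hj; simp [hds]
  have hsplit : penG level s = sumDW (s.drop k) - level * sumW (s.drop k) := by
    refine penG_split s level k (by omega) ?_ ?_
    · intro j hj hjl; rw [← hdsj j hjl]; exact hlo j hj (by omega)
    · intro j hj hjl; rw [← hdsj j hjl]; exact hhi j hj (by omega)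
  have hpen : penG level s = penG level (List.zip diffs (wlistB times)) := by
    unfold penG
    exact (hperm.map _).sum_eq
  rw [calc_eq_penG diffs times level h, ← hpen, hsplit,
    PySem.List.slice_to_natCast]
  ring

theorem loops_eq (diffs times prev_times : List Int) (base limit : Int)
    (ds : List Int) (suf : List (Int × Int))
    (hc : ∀ m : Int, costB base ds suf m = calculate_time diffs times prev_times m) :
    ∀ (fuel : Nat) (l r : Int),
      solLoopB base ds suf limit fuel l r = solLoopA diffs times prev_times limit fuel l r := by
  intro fuel
  induction fuel with
  | zero => intro l r; rfl
  | succ n ih =>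
    intro l r
    simp only [solLoopA, solLoopB, hc]
    split_ifs <;> simp [ih]

-- ===== VERDICT (by name: the statement is the Claim_ definition above) =====
theorem solution_spec : Claim_equal_solution := by
  intro diffs times limit _ hpre
  unfold Spec_solution solution solution_alt
  exact (loops_eq diffs times (0 :: times) _ limit _ _
    (fun m => cost_eq diffs times m hpre.2) _ _ _).symm
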